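-- pv_equiv track=rewrite | github.com/Bosbobos/Cryptography | Substitution.py | AffineRecDecode
-- ===== SOURCE A (Python) =====
-- def AffineRecDecode(alphabet, message, keyA1, keyA2, keyB1, keyB2):
--     m = len(alphabet)
--
--     keyA = [keyA1, keyA2]
--     keyB = [keyB1, keyB2]
--     for i in range(2, len(message)):
--         keyA += [keyA[i-1]*keyA[i-2]]
--         keyB += [keyB[i-1]+keyB[i-2]]
--
--     code = ''
--     for i in range(len(message)):
--         y = alphabet.index(message[i])
--         x = ((y - keyB[i]) * pow(keyA[i],-1, m)) % m
--         code += alphabet[x]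
--
--     return code
-- ===== SOURCE B (Python) =====
-- def AffineRecDecode(alphabet, message, keyA1, keyA2, keyB1, keyB2):
--     m = len(alphabet)
--     out = []
--     curA, nextA = keyA1, keyA2
--     curB, nextB = keyB1, keyB2
--     for ch in message:
--         y = alphabet.index(ch)
--         x = ((y - curB) * pow(curA, -1, m)) % m
--         out.append(alphabet[x])
--         curA, nextA = nextA, nextA * curA
--         curB, nextB = nextB, nextB + curB
--     return ''.join(out)
-- ===== Notes on version B (the rewrite author's own statement) =====
-- stated objective: alternative
-- what changed: B drops A's precomputed recurrence-key lists and decodes in a single pass over the message, carrying four rolling scalars (current/next key of each recurrence) and joining the decoded characters at the end.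
import Mathlib
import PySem

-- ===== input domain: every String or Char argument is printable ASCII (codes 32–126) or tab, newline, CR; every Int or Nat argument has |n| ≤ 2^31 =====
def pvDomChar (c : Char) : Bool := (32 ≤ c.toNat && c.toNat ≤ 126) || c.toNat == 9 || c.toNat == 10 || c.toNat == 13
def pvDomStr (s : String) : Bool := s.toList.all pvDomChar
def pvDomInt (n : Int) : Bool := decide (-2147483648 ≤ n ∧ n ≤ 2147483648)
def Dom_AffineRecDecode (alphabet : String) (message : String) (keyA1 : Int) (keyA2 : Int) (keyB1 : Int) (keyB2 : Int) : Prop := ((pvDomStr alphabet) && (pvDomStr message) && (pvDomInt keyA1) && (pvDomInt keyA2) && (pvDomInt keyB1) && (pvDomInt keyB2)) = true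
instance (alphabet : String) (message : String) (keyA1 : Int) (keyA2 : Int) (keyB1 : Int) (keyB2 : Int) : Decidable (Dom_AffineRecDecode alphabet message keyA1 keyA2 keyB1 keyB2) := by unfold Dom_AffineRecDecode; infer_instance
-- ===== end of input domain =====

-- B replaces A's precomputed key lists by a single pass over the message with four rolling
-- scalars (alternative decomposition, no key lists); same return value on Pre_.

-- models Python pow(a, -1, m) for m > 0: some v, v ∈ [0,m), the modular inverse; none = ValueError
-- (exact for m > 0; both ports only use it with m = len(alphabet), and Pre_ guarantees m > 0 there)
def pyInvMod (a m : Int) : Option Int :=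
  if 0 < m ∧ Int.gcd a m = 1 then some (Int.gcdA a m % m) else none

-- ===== PORT A =====
def AffineRecDecode (alphabet : String) (message : String) (keyA1 : Int) (keyA2 : Int) (keyB1 : Int) (keyB2 : Int) : String :=
  let al := alphabet.toList
  let m : Int := (al.length : Int)
  let n : Int := (message.toList.length : Int)
  let keyA := (PySem.List.pyRange 2 n 1).foldl
    (fun ka i => ka ++ [PySem.List.pyGetD ka (i-1) 0 * PySem.List.pyGetD ka (i-2) 0]) [keyA1, keyA2]
  let keyB := (PySem.List.pyRange 2 n 1).foldl
    (fun kb i => kb ++ [PySem.List.pyGetD kb (i-1) 0 + PySem.List.pyGetD kb (i-2) 0]) [keyB1, keyB2]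
  let code := (PySem.List.pyRange 0 n 1).foldl
    (fun code i =>
      let y : Int := (((PySem.List.index? al (PySem.List.pyGetD message.toList i ' ')).getD 0 : Nat) : Int)
      let x := PySem.Int.mod ((y - PySem.List.pyGetD keyB i 0) * (pyInvMod (PySem.List.pyGetD keyA i 0) m).getD 0) m
      code ++ [PySem.List.pyGetD al x ' ']) ([] : List Char)
  String.ofList code

-- ===== PORT B =====
-- the one-pass loop: state (curA, nextA, curB, nextB) holds the key values for this and the next index
def pvGo (al : List Char) (m : Int) : List Char → Int → Int → Int → Int → List Char
  | [], _, _, _, _ => []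
  | ch :: rest, curA, nextA, curB, nextB =>
    let y : Int := (((PySem.List.index? al ch).getD 0 : Nat) : Int)
    let x := PySem.Int.mod ((y - curB) * (pyInvMod curA m).getD 0) m
    PySem.List.pyGetD al x ' ' :: pvGo al m rest nextA (nextA * curA) nextB (nextB + curB)

def AffineRecDecode_alt (alphabet : String) (message : String) (keyA1 : Int) (keyA2 : Int) (keyB1 : Int) (keyB2 : Int) : String :=
  let al := alphabet.toList
  let m : Int := (al.length : Int)
  String.ofList (pvGo al m message.toList keyA1 keyA2 keyB1 keyB2)

-- ===== PRECONDITION & SPEC =====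
-- Pre_ = exactly where Python A returns normally: every message character occurs in the alphabet
-- (else alphabet.index raises ValueError), and the key-A values actually used are invertible mod
-- len(alphabet) — keyA1 if the message is nonempty (this also forces len(alphabet) > 0, needed by
-- pow(·,-1,m)), keyA2 if it has ≥ 2 characters; every later key is a product of these two, so it is
-- then invertible as well.
def Pre_AffineRecDecode (alphabet : String) (message : String) (keyA1 : Int) (keyA2 : Int) (keyB1 : Int) (keyB2 : Int) : Prop :=
  (message.toList.all (fun c => alphabet.toList.contains c)) = true ∧
  (1 ≤ message.toList.length → Int.gcd keyA1 (alphabet.toList.length : Int) = 1) ∧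
  (2 ≤ message.toList.length → Int.gcd keyA2 (alphabet.toList.length : Int) = 1)
instance (alphabet : String) (message : String) (keyA1 : Int) (keyA2 : Int) (keyB1 : Int) (keyB2 : Int) : Decidable (Pre_AffineRecDecode alphabet message keyA1 keyA2 keyB1 keyB2) := by unfold Pre_AffineRecDecode; infer_instance

def pvWitness_AffineRecDecode : String × String × Int × Int × Int × Int := ("abc", "ba", 1, 2, 0, 1)

def Spec_AffineRecDecode (alphabet : String) (message : String) (keyA1 : Int) (keyA2 : Int) (keyB1 : Int) (keyB2 : Int) (out : String) : Prop := out = AffineRecDecode_alt alphabet message keyA1 keyA2 keyB1 keyB2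
instance (alphabet : String) (message : String) (keyA1 : Int) (keyA2 : Int) (keyB1 : Int) (keyB2 : Int) (out : String) : Decidable (Spec_AffineRecDecode alphabet message keyA1 keyA2 keyB1 keyB2 out) := by unfold Spec_AffineRecDecode; infer_instance

-- ===== CLAIM (what is proved, stated in full; the proofs are below) =====
def Claim_equal_AffineRecDecode : Prop := ∀ (alphabet : String) (message : String) (keyA1 : Int) (keyA2 : Int) (keyB1 : Int) (keyB2 : Int), Dom_AffineRecDecode alphabet message keyA1 keyA2 keyB1 keyB2 → Pre_AffineRecDecode alphabet message keyA1 keyA2 keyB1 keyB2 → Spec_AffineRecDecode alphabet message keyA1 keyA2 keyB1 keyB2 (AffineRecDecode alphabet message keyA1 keyA2 keyB1 keyB2)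

-- ===== LEMMAS AND PROOFS =====

-- the key sequences A stores in lists: a(0)=keyA1, a(1)=keyA2, a(n+2)=a(n+1)*a(n); b analogous with +
def pvASeq (a1 a2 : Int) : Nat → Int
  | 0 => a1
  | 1 => a2
  | n+2 => pvASeq a1 a2 (n+1) * pvASeq a1 a2 n

def pvBSeq (b1 b2 : Int) : Nat → Int
  | 0 => b1
  | 1 => b2
  | n+2 => pvBSeq b1 b2 (n+1) + pvBSeq b1 b2 n

-- the character decoded at one index, common shape of both sides
def pvStep (al : List Char) (m : Int) (ch : Char) (a b : Int) : Char :=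
  PySem.List.pyGetD al (PySem.Int.mod (((((PySem.List.index? al ch).getD 0 : Nat) : Int) - b) * (pyInvMod a m).getD 0) m) ' '

theorem pvKeyA_eq (a1 a2 : Int) (n : Nat) :
    (PySem.List.pyRange 2 (n : Int) 1).foldl
      (fun ka i => ka ++ [PySem.List.pyGetD ka (i-1) 0 * PySem.List.pyGetD ka (i-2) 0]) [a1, a2]
    = (List.range (max 2 n)).map (pvASeq a1 a2) := by
  induction n with
  | zero =>
    rw [PySem.List.pyRange_one_eq_nil (by omega)]
    simp [List.range_succ, pvASeq]
  | succ n ih =>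
    by_cases hn : n < 2
    · rw [PySem.List.pyRange_one_eq_nil (by push_cast; omega)]
      rw [show max 2 (n+1) = 2 by omega]
      simp [List.range_succ, pvASeq]
    · have h2 : (2:Int) ≤ (n:Int) := by exact_mod_cast Nat.le_of_not_lt hn
      rw [show ((n+1 : Nat) : Int) = (n:Int) + 1 by push_cast; ring,
          PySem.List.pyRange_one_succ_right h2, List.foldl_append, ih]
      simp only [List.foldl_cons, List.foldl_nil]
      rw [show max 2 n = n by omega, show max 2 (n+1) = n+1 by omega,
          List.range_succ, List.map_append]
      congr 1
      rw [show (n:Int) - 1 = ((n-1 : Nat) : Int) by omega,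
          show (n:Int) - 2 = ((n-2 : Nat) : Int) by omega,
          PySem.List.pyGetD_natCast, PySem.List.pyGetD_natCast,
          PySem.List.getD_map_range _ _ _ _ (by omega),
          PySem.List.getD_map_range _ _ _ _ (by omega)]
      obtain ⟨k, rfl⟩ : ∃ k, n = k + 2 := ⟨n - 2, by omega⟩
      rw [show k+2-1 = k+1 from rfl, show k+2-2 = k from rfl]
      simp [pvASeq]

theorem pvKeyB_eq (b1 b2 : Int) (n : Nat) :
    (PySem.List.pyRange 2 (n : Int) 1).foldl
      (fun kb i => kb ++ [PySem.List.pyGetD kb (i-1) 0 + PySem.List.pyGetD kb (i-2) 0]) [b1, b2]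
    = (List.range (max 2 n)).map (pvBSeq b1 b2) := by
  induction n with
  | zero =>
    rw [PySem.List.pyRange_one_eq_nil (by omega)]
    simp [List.range_succ, pvBSeq]
  | succ n ih =>
    by_cases hn : n < 2
    · rw [PySem.List.pyRange_one_eq_nil (by push_cast; omega)]
      rw [show max 2 (n+1) = 2 by omega]
      simp [List.range_succ, pvBSeq]
    · have h2 : (2:Int) ≤ (n:Int) := by exact_mod_cast Nat.le_of_not_lt hn
      rw [show ((n+1 : Nat) : Int) = (n:Int) + 1 by push_cast; ring,
          PySem.List.pyRange_one_succ_right h2, List.foldl_append, ih]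
      simp only [List.foldl_cons, List.foldl_nil]
      rw [show max 2 n = n by omega, show max 2 (n+1) = n+1 by omega,
          List.range_succ, List.map_append]
      congr 1
      rw [show (n:Int) - 1 = ((n-1 : Nat) : Int) by omega,
          show (n:Int) - 2 = ((n-2 : Nat) : Int) by omega,
          PySem.List.pyGetD_natCast, PySem.List.pyGetD_natCast,
          PySem.List.getD_map_range _ _ _ _ (by omega),
          PySem.List.getD_map_range _ _ _ _ (by omega)]
      obtain ⟨k, rfl⟩ : ∃ k, n = k + 2 := ⟨n - 2, by omega⟩
      rw [show k+2-1 = k+1 from rfl, show k+2-2 = k from rfl]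
      simp [pvBSeq]

-- B's loop started at index j (with the key values for j and j+1) decodes the suffix msg.drop j
theorem pvGo_drop (al : List Char) (m : Int) (msg : List Char) (a1 a2 b1 b2 : Int) :
    ∀ (d j : Nat), j + d = msg.length →
    pvGo al m (msg.drop j) (pvASeq a1 a2 j) (pvASeq a1 a2 (j+1)) (pvBSeq b1 b2 j) (pvBSeq b1 b2 (j+1))
    = (List.range' j d).map (fun k => pvStep al m (msg.getD k ' ') (pvASeq a1 a2 k) (pvBSeq b1 b2 k)) := by
  intro d
  induction d with
  | zero =>
    intro j h
    rw [List.drop_of_length_le (by omega)]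
    simp [pvGo]
  | succ d ih =>
    intro j h
    have hj : j < msg.length := by omega
    rw [List.drop_eq_getElem_cons hj]
    simp only [pvGo]
    rw [show pvASeq a1 a2 (j+1) * pvASeq a1 a2 j = pvASeq a1 a2 ((j+1)+1) from rfl,
        show pvBSeq b1 b2 (j+1) + pvBSeq b1 b2 j = pvBSeq b1 b2 ((j+1)+1) from rfl,
        ih (j+1) (by omega), List.range'_succ]
    simp only [List.map_cons]
    congr 1
    rw [pvStep, List.getD_eq_getElem msg ' ' hj]

theorem pv_main_eq (alphabet message : String) (a1 a2 b1 b2 : Int) :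
    AffineRecDecode alphabet message a1 a2 b1 b2 = AffineRecDecode_alt alphabet message a1 a2 b1 b2 := by
  simp only [AffineRecDecode, AffineRecDecode_alt]
  rw [pvKeyA_eq, pvKeyB_eq]
  rw [PySem.List.foldl_append_singleton_eq_map
        (f := fun i => PySem.List.pyGetD alphabet.toList
          (PySem.Int.mod (((((PySem.List.index? alphabet.toList (PySem.List.pyGetD message.toList i ' ')).getD 0 : Nat) : Int)
              - PySem.List.pyGetD ((List.range (max 2 message.toList.length)).map (pvBSeq b1 b2)) i 0)
            * (pyInvMod (PySem.List.pyGetD ((List.range (max 2 message.toList.length)).map (pvASeq a1 a2)) i 0) (alphabet.toList.length : Int)).getD 0)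
            (alphabet.toList.length : Int)) ' ')]
  rw [show pvGo alphabet.toList (alphabet.toList.length : Int) message.toList a1 a2 b1 b2
        = pvGo alphabet.toList (alphabet.toList.length : Int) (message.toList.drop 0)
            (pvASeq a1 a2 0) (pvASeq a1 a2 1) (pvBSeq b1 b2 0) (pvBSeq b1 b2 1) from rfl,
      pvGo_drop _ _ _ _ _ _ _ message.toList.length 0 (by omega)]
  rw [← List.range_eq_range', List.nil_append, PySem.List.pyRange_one]
  congr 1
  rw [show ((message.toList.length : Int) - 0).toNat = message.toList.length by omega, List.map_map]
  apply List.map_congr_left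
  intro k hk
  have hk' : k < message.toList.length := List.mem_range.mp hk
  simp only [Function.comp, zero_add, pvStep]
  rw [PySem.List.pyGetD_natCast, PySem.List.pyGetD_natCast, PySem.List.pyGetD_natCast,
      PySem.List.getD_map_range _ _ _ _ (by omega), PySem.List.getD_map_range _ _ _ _ (by omega),
      List.getD_eq_getElem?_getD]

-- ===== VERDICT (by name: the statement is the Claim_ definition above) =====
theorem AffineRecDecode_spec : Claim_equal_AffineRecDecode := by
  intro alphabet message keyA1 keyA2 keyB1 keyB2 _ _
  exact pv_main_eq alphabet message keyA1 keyA2 keyB1 keyB2
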